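-- pv_equiv track=rewrite | github.com/sroziewski/poleval | parser.py | decode_prepare_data
-- ===== SOURCE A (Python) =====
-- syntax_split_keyword = 'syntaxsplit'
--
-- def decode_prepare_data(corpuse):
--     doc = []
--     res = []
--     for word in corpuse:
--         if word[0] == syntax_split_keyword:
--             res.append(doc)
--             doc = []
--         else:
--             doc.append(word)
--
--     res.append(doc)
--     return res
-- ===== SOURCE B (Python) =====
-- syntax_split_keyword = 'syntaxsplit'
--
--
-- def _first_split(words):
--     # index of the first delimiter word, or -1 if there is none
--     for i, w in enumerate(words):
--         if w[0] == syntax_split_keyword: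
--             return i
--     return -1
--
--
-- def decode_prepare_data(corpuse):
--     # recursive split-at-first-delimiter instead of one accumulating pass
--     words = list(corpuse)
--     i = _first_split(words)
--     if i < 0:
--         return [words]
--     return [words[:i]] + decode_prepare_data(words[i + 1:])
-- ===== Notes on version B (the rewrite author's own statement) =====
-- stated objective: alternative
-- what changed: Replaces A's single accumulating pass (current-doc + result lists) with a recursive split-at-first-delimiter: find the first 'syntaxsplit' word, slice the prefix off, and recurse on the remainder.
import Mathlib
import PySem

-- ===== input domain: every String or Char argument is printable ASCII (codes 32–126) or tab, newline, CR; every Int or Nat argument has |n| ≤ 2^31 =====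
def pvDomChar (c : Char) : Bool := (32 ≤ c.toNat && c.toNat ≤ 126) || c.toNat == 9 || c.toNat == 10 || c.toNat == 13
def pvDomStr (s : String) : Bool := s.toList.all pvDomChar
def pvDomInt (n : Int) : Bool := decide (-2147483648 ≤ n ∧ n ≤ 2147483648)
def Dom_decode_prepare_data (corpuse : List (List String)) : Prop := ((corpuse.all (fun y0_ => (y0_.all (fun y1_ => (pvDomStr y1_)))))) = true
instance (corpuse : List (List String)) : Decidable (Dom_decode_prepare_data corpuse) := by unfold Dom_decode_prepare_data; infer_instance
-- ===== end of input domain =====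

-- B replaces A's single accumulating pass (current doc + growing result) by a recursive
-- split-at-first-delimiter decomposition (find first 'syntaxsplit', slice, recurse);
-- same cost class, no speed claim.

def syntax_split_keyword : String := "syntaxsplit"

-- ===== PORT A =====
-- loop body of A's for-loop; state = (doc, res); word[0] via pyGet? (Pre_ keeps words nonempty)
def pvStepA (st : List (List String) × List (List (List String))) (word : List String) :
    List (List String) × List (List (List String)) :=
  if (PySem.List.pyGet? word 0).getD "" = syntax_split_keyword then ([], st.2 ++ [st.1])
  else (st.1 ++ [word], st.2)

def decode_prepare_data (corpuse : List (List String)) : List (List (List String)) :=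
  let st := corpuse.foldl pvStepA ([], [])
  st.2 ++ [st.1]

-- ===== PORT B =====
-- _first_split: index of the first delimiter word, or -1 (loop over enumerate, step for step)
def pvFirstSplit (i : Nat) : List (List String) → Int
  | [] => -1
  | w :: ws =>
    if (PySem.List.pyGet? w 0).getD "" = syntax_split_keyword then (i : Int)
    else pvFirstSplit (i + 1) ws

-- Source B's recursion, with fuel making the same computation total (the remainder slice is
-- strictly shorter than words, so fuel = len + 1 is never exhausted)
def pvAltAux : Nat → List (List String) → List (List (List String))
  | 0, words => [words]
  | fuel + 1, words =>
    if pvFirstSplit 0 words < 0 then [words]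
    else [PySem.List.slice words none (some (pvFirstSplit 0 words))] ++
      pvAltAux fuel (PySem.List.slice words (some (pvFirstSplit 0 words + 1)) none)

def decode_prepare_data_alt (corpuse : List (List String)) : List (List (List String)) :=
  pvAltAux (corpuse.length + 1) corpuse

-- ===== PRECONDITION & SPEC =====
-- Pre_ excludes corpora containing an empty word, on which Python A (word[0]) raises IndexError.
def Pre_decode_prepare_data (corpuse : List (List String)) : Prop :=
  ∀ w ∈ corpuse, w ≠ []
instance (corpuse : List (List String)) : Decidable (Pre_decode_prepare_data corpuse) := by
  unfold Pre_decode_prepare_data; infer_instance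

def pvWitness_decode_prepare_data : List (List String) :=
  [["a"], ["syntaxsplit"], ["b", "c"]]

def Spec_decode_prepare_data (corpuse : List (List String)) (out : List (List (List String))) : Prop := out = decode_prepare_data_alt corpuse
instance (corpuse : List (List String)) (out : List (List (List String))) : Decidable (Spec_decode_prepare_data corpuse out) := by unfold Spec_decode_prepare_data; infer_instance

-- ===== CLAIM (what is proved, stated in full; the proofs are below) =====
def Claim_equal_decode_prepare_data : Prop := ∀ (corpuse : List (List String)), Dom_decode_prepare_data corpuse → Pre_decode_prepare_data corpuse → Spec_decode_prepare_data corpuse (decode_prepare_data corpuse)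

-- ===== LEMMAS AND PROOFS =====

-- prepend doc to the first document of a result list
def pvApplyHead (doc : List (List String)) : List (List (List String)) → List (List (List String))
  | [] => [doc]
  | h :: t => (doc ++ h) :: t

theorem pvFirstSplit_ne_nil (ws : List (List String)) (i : Nat)
    (h : ¬ pvFirstSplit i ws < 0) : ws ≠ [] := by
  cases ws with
  | nil => simp [pvFirstSplit] at h
  | cons w ws => simp

theorem slice_rem_len (ws : List (List String)) (h : ¬ pvFirstSplit 0 ws < 0) :
    (PySem.List.slice ws (some (pvFirstSplit 0 ws + 1)) none).length < ws.length := by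
  rw [PySem.List.slice_from _ (by omega)]
  have hne : ws ≠ [] := pvFirstSplit_ne_nil ws 0 h
  have hpos : 0 < ws.length := List.length_pos_iff.mpr hne
  simp only [List.length_drop]
  omega

theorem pvAltAux_irrel (f1 : Nat) : ∀ (f2 : Nat) (ws : List (List String)),
    ws.length < f1 → ws.length < f2 → pvAltAux f1 ws = pvAltAux f2 ws := by
  induction f1 with
  | zero => intro f2 ws h1 _; omega
  | succ a ih =>
    intro f2 ws h1 h2
    cases f2 with
    | zero => omega
    | succ b =>
      simp only [pvAltAux]
      by_cases h : pvFirstSplit 0 ws < 0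
      · simp [h]
      · have hlen := slice_rem_len ws h
        rw [if_neg h, if_neg h]
        congr 1
        exact ih b _ (by omega) (by omega)

theorem alt_step (ws : List (List String)) :
    decode_prepare_data_alt ws =
      if pvFirstSplit 0 ws < 0 then [ws]
      else [PySem.List.slice ws none (some (pvFirstSplit 0 ws))] ++
        decode_prepare_data_alt (PySem.List.slice ws (some (pvFirstSplit 0 ws + 1)) none) := by
  by_cases h : pvFirstSplit 0 ws < 0
  · simp [decode_prepare_data_alt, pvAltAux, h]
  · have hlen := slice_rem_len ws h
    conv_lhs => rw [show decode_prepare_data_alt ws = pvAltAux (ws.length + 1) ws from rfl]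
    rw [pvAltAux, if_neg h, if_neg h]
    congr 1
    exact pvAltAux_irrel ws.length _ _ hlen (by omega)

theorem alt_ne_nil (ws : List (List String)) : decode_prepare_data_alt ws ≠ [] := by
  rw [alt_step]
  split <;> simp

theorem alt_nil : decode_prepare_data_alt [] = [[]] := by
  simp [decode_prepare_data_alt, pvAltAux, pvFirstSplit]

theorem pvFirstSplit_shift (ws : List (List String)) :
    ∀ i : Nat, pvFirstSplit i ws =
      if pvFirstSplit 0 ws < 0 then -1 else pvFirstSplit 0 ws + (i : Int) := by
  induction ws with
  | nil => intro i; simp [pvFirstSplit]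
  | cons w ws ih =>
    intro i
    by_cases hk : (PySem.List.pyGet? w 0).getD "" = syntax_split_keyword
    · simp [pvFirstSplit, hk]
    · simp only [pvFirstSplit, if_neg hk]
      rw [ih (i + 1), ih 1]
      by_cases h0 : pvFirstSplit 0 ws < 0
      · simp [h0]
      · rw [if_neg h0, if_neg h0, if_neg (by push_cast; omega)]
        push_cast
        ring

theorem alt_cons_key (w : List String) (ws : List (List String))
    (hk : (PySem.List.pyGet? w 0).getD "" = syntax_split_keyword) :
    decode_prepare_data_alt (w :: ws) = [] :: decode_prepare_data_alt ws := by
  have h0 : pvFirstSplit 0 (w :: ws) = 0 := by simp [pvFirstSplit, hk]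
  rw [alt_step, h0, if_neg (by omega)]
  have h1 : PySem.List.slice (w :: ws) none (some (0 : Int)) = [] := by
    rw [PySem.List.slice_to _ le_rfl]; simp
  have h2 : PySem.List.slice (w :: ws) (some ((0 : Int) + 1)) none = ws := by
    rw [PySem.List.slice_from _ (by omega)]; simp
  rw [h1, h2]
  simp

theorem alt_cons_nokey (w : List String) (ws : List (List String))
    (hk : ¬ (PySem.List.pyGet? w 0).getD "" = syntax_split_keyword) :
    decode_prepare_data_alt (w :: ws) =
      (w :: (decode_prepare_data_alt ws).headI) :: (decode_prepare_data_alt ws).tail := by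
  have h0 : pvFirstSplit 0 (w :: ws) = pvFirstSplit 1 ws := by
    simp [pvFirstSplit, hk]
  have hshift := pvFirstSplit_shift ws 1
  by_cases hn : pvFirstSplit 0 ws < 0
  · have hlt : pvFirstSplit 0 (w :: ws) < 0 := by rw [h0, hshift]; simp [hn]
    rw [alt_step, if_pos hlt, alt_step ws, if_pos hn]
    simp
  · set j := pvFirstSplit 0 ws with hj
    have hj0 : 0 ≤ j := by omega
    have h1 : pvFirstSplit 0 (w :: ws) = j + 1 := by
      rw [h0, hshift, if_neg hn]; push_cast; ring
    rw [alt_step (w :: ws), h1, if_neg (by omega)]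
    rw [alt_step ws, if_neg hn]
    have htake : PySem.List.slice (w :: ws) none (some (j + 1)) =
        w :: PySem.List.slice ws none (some j) := by
      rw [PySem.List.slice_to _ (by omega), PySem.List.slice_to _ hj0]
      have ht : (j + 1).toNat = j.toNat + 1 := by omega
      rw [ht, List.take_succ_cons]
    have hdrop : PySem.List.slice (w :: ws) (some (j + 1 + 1)) none =
        PySem.List.slice ws (some (j + 1)) none := by
      rw [PySem.List.slice_from _ (by omega), PySem.List.slice_from _ (by omega)]
      have hd : (j + 1 + 1).toNat = (j + 1).toNat + 1 := by omega
      rw [hd, List.drop_succ_cons]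
    rw [htake, hdrop]
    simp [hj]

theorem foldA_eq (ws : List (List String)) :
    ∀ (doc : List (List String)) (res : List (List (List String))),
      (ws.foldl pvStepA (doc, res)).2 ++ [(ws.foldl pvStepA (doc, res)).1] =
        res ++ pvApplyHead doc (decode_prepare_data_alt ws) := by
  induction ws with
  | nil =>
    intro doc res
    simp [alt_nil, pvApplyHead]
  | cons w ws ih =>
    intro doc res
    by_cases hk : (PySem.List.pyGet? w 0).getD "" = syntax_split_keyword
    · rw [List.foldl_cons]
      have hstep : pvStepA (doc, res) w = ([], res ++ [doc]) := by
        simp [pvStepA, hk]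
      rw [hstep, ih, alt_cons_key w ws hk]
      obtain ⟨h, t, hht⟩ := List.exists_cons_of_ne_nil (alt_ne_nil ws)
      rw [hht]
      simp [pvApplyHead]
    · rw [List.foldl_cons]
      have hstep : pvStepA (doc, res) w = (doc ++ [w], res) := by
        simp [pvStepA, hk]
      rw [hstep, ih, alt_cons_nokey w ws hk]
      obtain ⟨h, t, hht⟩ := List.exists_cons_of_ne_nil (alt_ne_nil ws)
      rw [hht]
      simp [pvApplyHead]

-- ===== VERDICT (by name: the statement is the Claim_ definition above) =====
theorem decode_prepare_data_spec : Claim_equal_decode_prepare_data := by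
  intro corpuse _ _
  unfold Spec_decode_prepare_data decode_prepare_data
  rw [foldA_eq corpuse [] []]
  obtain ⟨h, t, hht⟩ := List.exists_cons_of_ne_nil (alt_ne_nil corpuse)
  rw [hht]
  simp [pvApplyHead]
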